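-- pv_equiv track=rewrite | github.com/megobrien3d/hvh | modify_partitions.py | make_hash_dict
-- ===== SOURCE A (Python) =====
-- def make_hash_dict(partition, class_list):
--     hash_dict = {}
--
--     for cls in class_list:
--         temp_hash = []
--         for target, _ in partition:
--             if cls in target:
--                 temp_hash.append(1)
--             else:
--                 temp_hash.append(0)
--         hash_dict[cls] = temp_hash
--
--     return hash_dict
-- ===== SOURCE B (Python) =====
-- def make_hash_dict(partition, class_list):
--     hash_dict = {cls: [0] * len(partition) for cls in class_list}
--     for i, (target, _) in enumerate(partition):
--         for element in target:
--             if element in hash_dict: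
--                 hash_dict[element][i] = 1
--     return hash_dict
-- ===== Notes on version B (the rewrite author's own statement) =====
-- stated objective: faster
-- what changed: Instead of testing every class against every target (a membership scan per class per partition entry), B preallocates zero bit-vectors for each class once and then scatters 1s in a single pass over the partition contents, using the dict itself as the membership index.
import Mathlib
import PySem

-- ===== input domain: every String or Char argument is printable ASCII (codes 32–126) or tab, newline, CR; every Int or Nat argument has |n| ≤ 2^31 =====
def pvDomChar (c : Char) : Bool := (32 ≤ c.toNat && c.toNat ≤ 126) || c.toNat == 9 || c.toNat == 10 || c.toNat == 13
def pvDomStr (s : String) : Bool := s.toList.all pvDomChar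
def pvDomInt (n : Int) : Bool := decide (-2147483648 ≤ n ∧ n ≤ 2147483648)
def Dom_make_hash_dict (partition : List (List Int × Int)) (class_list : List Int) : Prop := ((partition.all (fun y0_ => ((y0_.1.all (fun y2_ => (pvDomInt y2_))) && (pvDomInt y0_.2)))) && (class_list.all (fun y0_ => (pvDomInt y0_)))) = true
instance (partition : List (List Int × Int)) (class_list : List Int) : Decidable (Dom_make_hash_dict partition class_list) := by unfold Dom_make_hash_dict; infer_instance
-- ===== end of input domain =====

-- B replaces A's per-class membership scan over every target by one preallocation of
-- zero bit-vectors plus a single scatter pass over the partition contents (objective: faster).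

-- ===== PORT A =====
-- for cls in class_list: temp_hash = [...]; hash_dict[cls] = temp_hash
def make_hash_dict (partition : List (List Int × Int)) (class_list : List Int) : List (Int × List Int) :=
  (class_list.foldl
    (fun (d : PySem.Dict Int (List Int)) cls =>
      d.insert cls (partition.foldl (fun temp p => temp ++ [if cls ∈ p.1 then (1 : Int) else 0]) []))
    PySem.Dict.empty).items

-- ===== PORT B =====
-- hash_dict = {cls: [0]*len(partition) for cls in class_list}; then scatter 1s over the targets
def make_hash_dict_alt (partition : List (List Int × Int)) (class_list : List Int) : List (Int × List Int) :=
  let d0 : PySem.Dict Int (List Int) :=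
    class_list.foldl (fun d cls => d.insert cls (List.replicate partition.length (0 : Int))) PySem.Dict.empty
  ((PySem.List.enumerate partition 0).foldl
    (fun d ip =>
      ip.2.1.foldl
        (fun d e => if d.contains e then d.modify e [] (fun v => PySem.List.pySetD v ip.1 1) else d) d)
    d0).items

-- ===== PRECONDITION & SPEC =====
def Spec_make_hash_dict (partition : List (List Int × Int)) (class_list : List Int) (out : List (Int × List Int)) : Prop := out = make_hash_dict_alt partition class_list
instance (partition : List (List Int × Int)) (class_list : List Int) (out : List (Int × List Int)) : Decidable (Spec_make_hash_dict partition class_list out) := by unfold Spec_make_hash_dict; infer_instance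

-- ===== CLAIM (what is proved, stated in full; the proofs are below) =====
def Claim_equal_make_hash_dict : Prop := ∀ (partition : List (List Int × Int)) (class_list : List Int), Dom_make_hash_dict partition class_list → Spec_make_hash_dict partition class_list (make_hash_dict partition class_list)

-- ===== LEMMAS AND PROOFS =====

-- appending singletons in a loop is mapping
theorem pv_foldl_push {α β : Type} (f : α → β) : ∀ (l : List α) (a : List β),
    l.foldl (fun acc x => acc ++ [f x]) a = a ++ l.map f
  | [], a => by simp
  | x :: l, a => by simp [List.foldl, pv_foldl_push f l]

-- lookup after a loop of inserts whose value depends only on the key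
theorem pv_getD_foldl_insert (f : Int → List Int) : ∀ (l : List Int) (d : PySem.Dict Int (List Int)) (k : Int),
    (l.foldl (fun d c => d.insert c (f c)) d).getD k [] = if k ∈ l then f k else d.getD k []
  | [], d, k => by simp
  | c :: l, d, k => by
    simp only [List.foldl_cons, pv_getD_foldl_insert f l, List.mem_cons]
    by_cases hk : k ∈ l
    · simp [hk]
    · by_cases he : k = c
      · subst he; simp [hk, PySem.Dict.getD_insert_self]
      · simp [hk, he, PySem.Dict.getD_insert_of_ne _ _ _ he]

-- one scatter step keeps the key set
theorem pv_contains_step (i e k : Int) (d : PySem.Dict Int (List Int)) :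
    (if d.contains e then d.modify e [] (fun v => PySem.List.pySetD v i 1) else d).contains k = d.contains k := by
  split_ifs with h
  · rw [PySem.Dict.contains_modify]
    by_cases hk : k = e
    · subst hk; simp [h]
    · simp [hk]
  · rfl

-- one scatter step, seen through getD
theorem pv_getD_step (i e k : Int) (d : PySem.Dict Int (List Int)) :
    (if d.contains e then d.modify e [] (fun v => PySem.List.pySetD v i 1) else d).getD k []
      = if k = e ∧ d.contains k = true then PySem.List.pySetD (d.getD k []) i 1 else d.getD k [] := by
  by_cases h : d.contains e = true
  · simp only [h, if_true]
    rw [PySem.Dict.getD_modify]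
    by_cases hk : k = e
    · subst hk; simp [h]
    · simp [hk]
  · simp only [h, if_false, Bool.false_eq_true]
    by_cases hk : k = e
    · subst hk; simp [h]
    · simp [hk]

theorem pv_contains_inner (i : Int) : ∀ (target : List Int) (d : PySem.Dict Int (List Int)) (k : Int),
    (target.foldl (fun d e => if d.contains e then d.modify e [] (fun v => PySem.List.pySetD v i 1) else d) d).contains k = d.contains k
  | [], _, _ => rfl
  | e :: t, d, k => by
    simp only [List.foldl_cons]
    rw [pv_contains_inner i t, pv_contains_step]

theorem pv_getD_inner (i : Int) (hi : 0 ≤ i) : ∀ (target : List Int) (d : PySem.Dict Int (List Int)) (k : Int),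
    (target.foldl (fun d e => if d.contains e then d.modify e [] (fun v => PySem.List.pySetD v i 1) else d) d).getD k []
      = if k ∈ target ∧ d.contains k = true then PySem.List.pySetD (d.getD k []) i 1 else d.getD k []
  | [], d, k => by simp
  | e :: t, d, k => by
    simp only [List.foldl_cons]
    rw [pv_getD_inner i hi t, pv_contains_step, pv_getD_step]
    simp only [List.mem_cons]
    have hidem : ∀ v : List Int,
        PySem.List.pySetD (PySem.List.pySetD v i 1) i 1 = PySem.List.pySetD v i 1 := by
      intro v
      rw [PySem.List.pySetD_of_nonneg v 1 hi, PySem.List.pySetD_of_nonneg _ 1 hi, List.set_set]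
    by_cases hc : d.contains k = true
    · by_cases he : k = e
      · subst he
        by_cases ht : k ∈ t
        · simp [hc, ht, hidem]
        · simp [hc, ht]
      · by_cases ht : k ∈ t <;> simp [hc, he, ht]
    · simp [hc]

theorem pv_getD_outer (k : Int) : ∀ (ps : List (Int × (List Int × Int))) (d : PySem.Dict Int (List Int)),
    (∀ p ∈ ps, (0 : Int) ≤ p.1) → d.contains k = true →
    (ps.foldl
        (fun d ip => ip.2.1.foldl
          (fun d e => if d.contains e then d.modify e [] (fun v => PySem.List.pySetD v ip.1 1) else d) d)
        d).getD k []
      = ps.foldl (fun v ip => if k ∈ ip.2.1 then PySem.List.pySetD v ip.1 1 else v) (d.getD k [])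
  | [], d, _, _ => rfl
  | ip :: ps, d, hpos, hc => by
    simp only [List.foldl_cons]
    have hi : (0 : Int) ≤ ip.1 := hpos ip (by simp)
    rw [pv_getD_outer k ps _ (fun p hp => hpos p (by simp [hp])) (by rw [pv_contains_inner]; exact hc)]
    rw [pv_getD_inner ip.1 hi]
    by_cases hm : k ∈ ip.2.1 <;> simp [hm, hc]

-- scatter over enumerated targets rebuilds exactly A's per-class bit vector
theorem pv_bits (k : Int) : ∀ (ps : List (List Int × Int)) (pre : List Int),
    (PySem.List.enumerate ps (pre.length : Int)).foldl
        (fun v ip => if k ∈ ip.2.1 then PySem.List.pySetD v ip.1 1 else v)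
        (pre ++ List.replicate ps.length (0 : Int))
      = pre ++ ps.map (fun p => if k ∈ p.1 then (1 : Int) else 0)
  | [], pre => by simp [PySem.List.enumerate_nil]
  | p :: ps, pre => by
    rw [PySem.List.enumerate_cons]
    simp only [List.foldl_cons, List.length_cons, List.replicate_succ]
    have hset : PySem.List.pySetD (pre ++ 0 :: List.replicate ps.length (0 : Int)) (pre.length : Int) 1
        = pre ++ 1 :: List.replicate ps.length (0 : Int) := by
      rw [PySem.List.pySetD_natCast, List.set_append]
      simp
    have hstep : (if k ∈ p.1 then
          PySem.List.pySetD (pre ++ 0 :: List.replicate ps.length (0 : Int)) (pre.length : Int) 1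
        else pre ++ 0 :: List.replicate ps.length (0 : Int))
        = (pre ++ [if k ∈ p.1 then (1 : Int) else 0]) ++ List.replicate ps.length (0 : Int) := by
      by_cases hm : k ∈ p.1 <;> simp [hm, hset]
    rw [hstep]
    have hlen : ((pre.length : Int) + 1) = (((pre ++ [if k ∈ p.1 then (1 : Int) else 0]).length : Nat) : Int) := by
      simp
    rw [hlen, pv_bits k ps]
    simp

-- keys of an insert at a present key
theorem pv_keys_insert_of_contains (d : PySem.Dict Int (List Int)) (e : Int) (v : List Int)
    (h : d.contains e = true) : (d.insert e v).keys = d.keys := by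
  simp only [PySem.Dict.keys]
  rw [PySem.Dict.items_insert_of_contains _ _ h, List.map_map]
  refine List.map_congr_left ?_
  intro p _
  by_cases hp : p.1 = e
  · simp [hp]
  · simp [hp]

theorem pv_keys_step (i e : Int) (d : PySem.Dict Int (List Int)) :
    (if d.contains e then d.modify e [] (fun v => PySem.List.pySetD v i 1) else d).keys = d.keys := by
  split_ifs with h
  · rw [PySem.Dict.keys_modify, pv_keys_insert_of_contains _ _ _ h]
  · rfl

theorem pv_keys_inner (i : Int) : ∀ (target : List Int) (d : PySem.Dict Int (List Int)),
    (target.foldl (fun d e => if d.contains e then d.modify e [] (fun v => PySem.List.pySetD v i 1) else d) d).keys = d.keys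
  | [], _ => rfl
  | e :: t, d => by
    simp only [List.foldl_cons]
    rw [pv_keys_inner i t, pv_keys_step]

theorem pv_keys_outer : ∀ (ps : List (Int × (List Int × Int))) (d : PySem.Dict Int (List Int)),
    (ps.foldl
        (fun d ip => ip.2.1.foldl
          (fun d e => if d.contains e then d.modify e [] (fun v => PySem.List.pySetD v ip.1 1) else d) d)
        d).keys = d.keys
  | [], _ => rfl
  | ip :: ps, d => by
    simp only [List.foldl_cons]
    rw [pv_keys_outer ps, pv_keys_inner]

-- ===== VERDICT (by name: the statement is the Claim_ definition above) =====
theorem make_hash_dict_spec : Claim_equal_make_hash_dict := by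
  unfold Claim_equal_make_hash_dict Spec_make_hash_dict
  intro partition class_list _
  unfold make_hash_dict make_hash_dict_alt
  simp only []
  set dA : PySem.Dict Int (List Int) := class_list.foldl
    (fun d cls => d.insert cls (partition.foldl (fun temp p => temp ++ [if cls ∈ p.1 then (1 : Int) else 0]) []))
    PySem.Dict.empty with hdA
  set d0 : PySem.Dict Int (List Int) := class_list.foldl
    (fun d cls => d.insert cls (List.replicate partition.length (0 : Int))) PySem.Dict.empty with hd0
  set dB : PySem.Dict Int (List Int) := (PySem.List.enumerate partition 0).foldl
    (fun d ip => ip.2.1.foldl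
      (fun d e => if d.contains e then d.modify e [] (fun v => PySem.List.pySetD v ip.1 1) else d) d)
    d0 with hdB
  have hkA : dA.keys = PySem.Set.update ([] : List Int) class_list := by
    rw [hdA, PySem.Dict.keys_foldl_insert, PySem.Dict.keys_empty]
  have hk0 : d0.keys = PySem.Set.update ([] : List Int) class_list := by
    rw [hd0, PySem.Dict.keys_foldl_insert, PySem.Dict.keys_empty]
  have hkB : dB.keys = PySem.Set.update ([] : List Int) class_list := by
    rw [hdB, pv_keys_outer, hk0]
  have hnd : (PySem.Set.update ([] : List Int) class_list).Nodup :=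
    PySem.Set.nodup_update _ _ List.nodup_nil
  rw [PySem.Dict.items_eq_map_keys dA (by rw [hkA]; exact hnd) [],
    PySem.Dict.items_eq_map_keys dB (by rw [hkB]; exact hnd) [], hkA, hkB]
  refine List.map_congr_left ?_
  intro k hk
  have hkc : k ∈ class_list := by
    rcases (PySem.Set.mem_update ([] : List Int) class_list k).mp hk with h | h
    · cases h
    · exact h
  have hcont : d0.contains k = true := by
    rw [PySem.Dict.contains_eq_decide_mem_keys, hk0]
    simp [PySem.Set.mem_update, hkc]
  have hA : dA.getD k []
      = partition.map (fun p => if k ∈ p.1 then (1 : Int) else 0) := by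
    rw [hdA, pv_getD_foldl_insert, if_pos hkc, pv_foldl_push]
    simp
  have h0 : d0.getD k [] = List.replicate partition.length (0 : Int) := by
    rw [hd0, pv_getD_foldl_insert, if_pos hkc]
  have hpos : ∀ p ∈ PySem.List.enumerate partition 0, (0 : Int) ≤ p.1 := by
    intro p hp
    rcases (PySem.List.mem_enumerate_iff partition 0 p).mp hp with ⟨j, hj, rfl⟩
    simp
  have hB : dB.getD k []
      = partition.map (fun p => if k ∈ p.1 then (1 : Int) else 0) := by
    rw [hdB, pv_getD_outer k _ _ hpos hcont, h0]
    have h00 : (0 : Int) = ((([] : List Int).length : Nat) : Int) := by simp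
    rw [h00]
    have := pv_bits k partition ([] : List Int)
    simpa using this
  simp [hA, hB]
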